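-- pv_equiv track=rewrite | github.com/FormalGeo/FormalGeo | src/formalgeo/parse/inverse_parse_s2n.py | inverse_parse_gdl
-- ===== SOURCE A (Python) =====
-- import string
--
-- def inverse_parse_gdl(p_vars, s):
--     i = 0
--     while i < len(s) - 2:
--         if s[i] == "{" and s[i + 1] in string.ascii_uppercase and s[i + 2] == "}":
--             s = s.replace(s[i:i + 3], "{" + str(p_vars.index(s[i + 1])) + "}")
--             i += 3
--         else:
--             i += 1
--     return s
-- ===== SOURCE B (Python) =====
-- import string
--
-- def inverse_parse_gdl(p_vars, s):
--     # single left-to-right pass building the output, instead of repeated global str.replace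
--     out = []
--     i = 0
--     n = len(s)
--     while i < n:
--         if i + 2 < n and s[i] == "{" and s[i + 1] in string.ascii_uppercase and s[i + 2] == "}":
--             out.append("{" + str(p_vars.index(s[i + 1])) + "}")
--             i += 3
--         else:
--             out.append(s[i])
--             i += 1
--     return "".join(out)
-- ===== Notes on version B (the rewrite author's own statement) =====
-- stated objective: alternative
-- what changed: B makes one left-to-right pass that emits each char or the replaced token into an output buffer, instead of A's scan that repeatedly rewrites the whole string with global str.replace and re-indexes into the mutated string.
import Mathlib
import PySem

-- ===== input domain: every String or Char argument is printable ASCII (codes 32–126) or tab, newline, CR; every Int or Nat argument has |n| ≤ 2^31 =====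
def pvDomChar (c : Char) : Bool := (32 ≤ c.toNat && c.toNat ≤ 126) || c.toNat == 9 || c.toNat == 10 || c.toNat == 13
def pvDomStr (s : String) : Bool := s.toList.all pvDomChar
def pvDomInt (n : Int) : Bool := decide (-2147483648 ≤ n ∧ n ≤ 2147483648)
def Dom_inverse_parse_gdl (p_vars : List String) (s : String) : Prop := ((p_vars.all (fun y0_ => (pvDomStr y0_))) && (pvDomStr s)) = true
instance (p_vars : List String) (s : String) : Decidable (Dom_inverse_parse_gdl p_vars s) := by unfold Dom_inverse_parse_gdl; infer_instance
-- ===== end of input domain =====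

-- B replaces A's repeated global str.replace rewriting with a single left-to-right pass
-- emitting into an output buffer (objective: alternative; return value only).


-- ===== PORT A =====
-- `c in string.ascii_uppercase` for a single character c (exact: membership in "A".."Z")
def pvUpper (c : Char) : Bool := 'A' ≤ c && c ≤ 'Z'

-- the while loop of A; s is the current string, i the scan index (always ≥ 0 in Python).
-- fuel only makes the loop total; it is provably never exhausted on Pre_ (lemmas below).
def loopA (p_vars : List String) : Nat → List Char → Nat → List Char
  | 0, s, _ => s
  | fuel+1, s, i =>
    if i + 2 < s.length then
      if s.getD i ' ' = '{' && pvUpper (s.getD (i+1) ' ') && s.getD (i+2) ' ' = '}' then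
        match PySem.List.index? p_vars (String.ofList [s.getD (i+1) ' ']) with
        | some k =>
            -- s = s.replace(s[i:i+3], "{" + str(p_vars.index(s[i+1])) + "}"); i += 3
            -- s[i:i+3] = (s.drop i).take 3 since 0 ≤ i and i+2 < len s
            loopA p_vars fuel
              (PySem.Chars.replace s ((List.drop i s).take 3)
                ('{' :: PySem.Int.toChars (k : Int) ++ ['}'])) (i+3)
        | none => s   -- Python raises ValueError here (excluded by Pre_)
      else loopA p_vars fuel s (i+1)
    else s

def inverse_parse_gdl (p_vars : List String) (s : String) : String :=
  String.ofList (loopA p_vars (s.toList.length * (p_vars.length + 3)) s.toList 0)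

-- ===== PORT B =====
-- B's single pass: at each position, if a token "{X}" starts here emit "{index}" and jump 3,
-- else emit the character and advance 1 (the two short base cases are the tail where
-- fewer than 3 characters remain, so B's token condition is false and chars are emitted).
def goB (p_vars : List String) : List Char → List Char
  | [] => []
  | [a] => [a]
  | [a, b] => [a, b]
  | a :: b :: d :: t =>
    if a = '{' && pvUpper b && d = '}' then
      match PySem.List.index? p_vars (String.ofList [b]) with
      | some k => '{' :: (PySem.Int.toChars (k : Int) ++ '}' :: goB p_vars t)
      | none => a :: b :: d :: t   -- Python raises ValueError here (excluded by Pre_)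
    else a :: goB p_vars (b :: d :: t)

def inverse_parse_gdl_alt (p_vars : List String) (s : String) : String :=
  String.ofList (goB p_vars s.toList)

-- ===== PRECONDITION & SPEC =====
-- "if a token starts here, its letter is an element of p_vars"
def okAt (p_vars : List String) (l : List Char) : Bool :=
  match l with
  | a :: b :: d :: _ => !(a = '{' && pvUpper b && d = '}') || decide ((String.ofList [b]) ∈ p_vars)
  | _ => true

def goodToks (p_vars : List String) : List Char → Bool
  | [] => true
  | c :: rest => okAt p_vars (c :: rest) && goodToks p_vars rest

-- Pre_ excludes exactly the inputs on which A raises ValueError: those s containing a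
-- token "{X}" (X uppercase) whose letter X is not an element of p_vars (B raises there too).
def Pre_inverse_parse_gdl (p_vars : List String) (s : String) : Prop :=
  goodToks p_vars s.toList = true
instance (p_vars : List String) (s : String) : Decidable (Pre_inverse_parse_gdl p_vars s) := by
  unfold Pre_inverse_parse_gdl; infer_instance

def pvWitness_inverse_parse_gdl : List String × String := (["A", "B"], "x{B}y{A}")

def Spec_inverse_parse_gdl (p_vars : List String) (s : String) (out : String) : Prop := out = inverse_parse_gdl_alt p_vars s
instance (p_vars : List String) (s : String) (out : String) : Decidable (Spec_inverse_parse_gdl p_vars s out) := by unfold Spec_inverse_parse_gdl; infer_instance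

-- ===== CLAIM (what is proved, stated in full; the proofs are below) =====
def Claim_equal_inverse_parse_gdl : Prop := ∀ (p_vars : List String) (s : String), Dom_inverse_parse_gdl p_vars s → Pre_inverse_parse_gdl p_vars s → Spec_inverse_parse_gdl p_vars s (inverse_parse_gdl p_vars s)

-- ===== LEMMAS AND PROOFS =====

-- "a token starts here": the next three characters are '{', an uppercase letter, '}'
def tokAt0 (l : List Char) : Bool :=
  match l with
  | a :: b :: d :: _ => a = '{' && pvUpper b && d = '}'
  | _ => false

-- ---- the token pattern and a simple structural model of Python's str.replace ----
def pat (X : Char) : List Char := ['{', X, '}']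

def repl (X : Char) (r : List Char) : List Char → List Char
  | [] => []
  | c :: t => if (pat X).isPrefixOf (c :: t) then r ++ repl X r (t.drop 2) else c :: repl X r t
  termination_by l => l.length
  decreasing_by all_goals simp

def occX (X : Char) : List Char → Nat
  | [] => 0
  | c :: t => if (pat X).isPrefixOf (c :: t) then 1 + occX X (t.drop 2) else occX X t
  termination_by l => l.length
  decreasing_by all_goals simp

def tokCount : List Char → Nat
  | [] => 0
  | c :: rest => (if tokAt0 (c :: rest) then 1 else 0) + tokCount rest

lemma repl_pos {X : Char} {r : List Char} {c : Char} {t : List Char}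
    (hp : (pat X).isPrefixOf (c :: t)) : repl X r (c :: t) = r ++ repl X r (t.drop 2) := by
  rw [repl]; simp [hp]

lemma repl_neg {X : Char} {r : List Char} {c : Char} {t : List Char}
    (hp : ¬ (pat X).isPrefixOf (c :: t)) : repl X r (c :: t) = c :: repl X r t := by
  rw [repl]; simp [hp]

lemma occX_pos {X : Char} {c : Char} {t : List Char}
    (hp : (pat X).isPrefixOf (c :: t)) : occX X (c :: t) = 1 + occX X (t.drop 2) := by
  rw [occX]; simp [hp]

lemma occX_neg {X : Char} {c : Char} {t : List Char}
    (hp : ¬ (pat X).isPrefixOf (c :: t)) : occX X (c :: t) = occX X t := by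
  rw [occX]; simp [hp]

lemma go_eq (X : Char) (r : List Char) :
    ∀ (fuel : Nat) (l acc : List Char), l.length ≤ fuel →
      PySem.Chars.replace.go (pat X) r fuel l acc = acc.reverse ++ repl X r l := by
  intro fuel
  induction fuel with
  | zero =>
    intro l acc h
    have : l = [] := List.eq_nil_of_length_eq_zero (Nat.le_zero.mp h)
    subst this
    simp [PySem.Chars.replace.go, repl]
  | succ n ih =>
    intro l acc h
    match l with
    | [] => simp [PySem.Chars.replace.go, repl]
    | c :: t =>
      rw [PySem.Chars.replace.go]
      by_cases hp : (pat X).isPrefixOf (c :: t)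
      · have hlen : 3 ≤ (c :: t).length := by
          simpa [pat] using (List.isPrefixOf_iff_prefix.mp hp).length_le
        have hd : (List.drop (pat X).length (c :: t)).length ≤ n := by
          simp only [List.length_drop, List.length_cons] at *
          simp only [pat, List.length_cons, List.length_nil]
          omega
        simp only [hp, if_true]
        rw [ih _ _ hd]
        rw [repl_pos hp]
        simp [pat]
      · have ht : t.length ≤ n := by simp at h; omega
        simp only [hp, if_false]
        rw [ih _ _ ht]
        rw [repl_neg hp]
        simp

-- Python's s.replace("{X}", r) is repl X r
lemma replace_eq_repl (X : Char) (r s : List Char) :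
    PySem.Chars.replace s (pat X) r = repl X r s := by
  rw [PySem.Chars.replace]
  have := go_eq X r s.length s [] le_rfl
  simp only [List.reverse_nil, List.nil_append] at this
  simp [pat] at this ⊢
  exact this

-- ---- character facts ----
lemma upper_ne_lbrace {c : Char} (h : pvUpper c = true) : c ≠ '{' := by
  rintro rfl; revert h; decide

lemma digit_not_upper {c : Char} (h : c.isDigit = true) : pvUpper c = false := by
  simp only [Char.isDigit, Bool.and_eq_true, decide_eq_true_eq] at h
  by_contra h'
  rw [Bool.not_eq_false] at h'
  simp only [pvUpper, Bool.and_eq_true, decide_eq_true_eq] at h'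
  exact absurd (le_trans h'.1 h.2) (by decide)

lemma digit_ne_lbrace {c : Char} (h : c.isDigit = true) : c ≠ '{' := by
  rintro rfl; exact absurd h (by decide)

-- ---- prefix of the pattern ----
lemma pat_prefix_iff {X : Char} {l : List Char} :
    (pat X).isPrefixOf l = true ↔ ∃ t, l = '{' :: X :: '}' :: t := by
  rw [List.isPrefixOf_iff_prefix]
  constructor
  · intro h
    rw [pat, List.cons_prefix_iff] at h
    obtain ⟨l1, rfl, h⟩ := h
    rw [List.cons_prefix_iff] at h
    obtain ⟨l2, rfl, h⟩ := h
    rw [List.cons_prefix_iff] at h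
    obtain ⟨l3, rfl, _⟩ := h
    exact ⟨l3, rfl⟩
  · rintro ⟨t, rfl⟩
    simp [pat, List.cons_prefix_iff]

-- ---- tokAt0 / okAt basics ----
lemma tokAt0_cons_ne {c : Char} (h : c ≠ '{') (w : List Char) : tokAt0 (c :: w) = false := by
  match w with
  | [] => rfl
  | [_] => rfl
  | _ :: _ :: _ => simp [tokAt0, h]

lemma tokAt0_nonupper {a b : Char} (h : pvUpper b = false) (w : List Char) :
    tokAt0 (a :: b :: w) = false := by
  match w with
  | [] => rfl
  | _ :: _ => simp [tokAt0, h]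

lemma okAt_cons_ne {p_vars : List String} {c : Char} (h : c ≠ '{') (w : List Char) :
    okAt p_vars (c :: w) = true := by
  match w with
  | [] => rfl
  | [_] => rfl
  | _ :: _ :: _ => simp [okAt, h]

lemma okAt_nonupper {p_vars : List String} {a b : Char} (h : pvUpper b = false) (w : List Char) :
    okAt p_vars (a :: b :: w) = true := by
  match w with
  | [] => rfl
  | _ :: _ => simp [okAt, h]

lemma goodToks_tail {p_vars : List String} {c : Char} {w : List Char}
    (h : goodToks p_vars (c :: w) = true) : goodToks p_vars w = true := by
  rw [goodToks, Bool.and_eq_true] at h; exact h.2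

lemma goodToks_cons {p_vars : List String} {c : Char} {w : List Char}
    (h : goodToks p_vars (c :: w) = true) : okAt p_vars (c :: w) = true := by
  rw [goodToks, Bool.and_eq_true] at h; exact h.1

-- tokAt0 looks only at the first three characters
lemma tokAt0_eq_of_three {u v w : List Char} (h : 3 ≤ u.length) :
    tokAt0 (u ++ v) = tokAt0 (u ++ w) := by
  match u with
  | a :: b :: d :: t => simp [tokAt0]
  | [] | [_] | [_, _] => simp at h

-- ---- appending a brace-free block on the left ----
lemma tokCount_noBrace_append {w : List Char} (hw : ∀ c ∈ w, c ≠ '{') (Z : List Char) :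
    tokCount (w ++ Z) = tokCount Z := by
  induction w with
  | nil => rfl
  | cons c w ih =>
    rw [List.cons_append, tokCount, tokAt0_cons_ne (hw c (by simp)) _]
    simp [ih (fun c hc => hw c (by simp [hc]))]

lemma goodToks_noBrace_append {p_vars : List String} {w : List Char}
    (hw : ∀ c ∈ w, c ≠ '{') (Z : List Char) :
    goodToks p_vars (w ++ Z) = goodToks p_vars Z := by
  induction w with
  | nil => rfl
  | cons c w ih =>
    rw [List.cons_append, goodToks, okAt_cons_ne (hw c (by simp)) _]
    simp [ih (fun c hc => hw c (by simp [hc]))]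

lemma goB_cons_ne {p_vars : List String} {c : Char} (h : c ≠ '{') (w : List Char) :
    goB p_vars (c :: w) = c :: goB p_vars w := by
  match w with
  | [] => rfl
  | [_] => rfl
  | _ :: _ :: _ => rw [goB]; simp [h]

lemma goB_noBrace_append {p_vars : List String} {w : List Char}
    (hw : ∀ c ∈ w, c ≠ '{') (Z : List Char) :
    goB p_vars (w ++ Z) = w ++ goB p_vars Z := by
  induction w with
  | nil => rfl
  | cons c w ih =>
    rw [List.cons_append, goB_cons_ne (hw c (by simp)) _,
      ih (fun c hc => hw c (by simp [hc]))]
    simp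

-- ---- the replacement string r = "{digits}" ----
-- facts about r ++ Z: no token starts inside r, and goB passes r through unchanged
lemma tokAt0_r {d : Char} (hd : d.isDigit = true) (w : List Char) :
    tokAt0 ('{' :: d :: w) = false := tokAt0_nonupper (digit_not_upper hd) w

lemma tokCount_r_append {ds : List Char} (hds : ds ≠ []) (hdig : ∀ c ∈ ds, c.isDigit) (Z : List Char) :
    tokCount (('{' :: ds ++ ['}']) ++ Z) = tokCount Z := by
  match ds with
  | d :: ds' =>
    simp only [List.cons_append, List.append_assoc]
    rw [tokCount, tokAt0_r (hdig d (by simp)) _]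
    have hne : ∀ c ∈ (d :: ds') ++ ['}'], c ≠ '{' := by
      intro c hc
      rcases List.mem_append.mp hc with h | h
      · exact digit_ne_lbrace (hdig c h)
      · simp at h; subst h; decide
    have h2 := tokCount_noBrace_append hne Z
    simp only [List.cons_append, List.append_assoc, List.singleton_append, List.nil_append] at h2
    simpa using h2

lemma goodToks_r_append {p_vars : List String} {ds : List Char} (hds : ds ≠ [])
    (hdig : ∀ c ∈ ds, c.isDigit) (Z : List Char) :
    goodToks p_vars (('{' :: ds ++ ['}']) ++ Z) = goodToks p_vars Z := by
  match ds with
  | d :: ds' =>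
    simp only [List.cons_append, List.append_assoc]
    rw [goodToks, okAt_nonupper (digit_not_upper (hdig d (by simp))) _]
    have hne : ∀ c ∈ (d :: ds') ++ ['}'], c ≠ '{' := by
      intro c hc
      rcases List.mem_append.mp hc with h | h
      · exact digit_ne_lbrace (hdig c h)
      · simp at h; subst h; decide
    have h2 := goodToks_noBrace_append (p_vars := p_vars) hne Z
    simp only [List.cons_append, List.append_assoc, List.singleton_append, List.nil_append] at h2
    simpa using h2

lemma goB_r_append {p_vars : List String} {ds : List Char} (hds : ds ≠ [])
    (hdig : ∀ c ∈ ds, c.isDigit) (Z : List Char) :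
    goB p_vars (('{' :: ds ++ ['}']) ++ Z) = ('{' :: ds ++ ['}']) ++ goB p_vars Z := by
  match ds with
  | d :: ds' =>
    have hne : ∀ c ∈ (d :: ds') ++ ['}'], c ≠ '{' := by
      intro c hc
      rcases List.mem_append.mp hc with h | h
      · exact digit_ne_lbrace (hdig c h)
      · simp at h; subst h; decide
    have h1 : goB p_vars ('{' :: (((d :: ds') ++ ['}']) ++ Z)) =
        '{' :: goB p_vars (((d :: ds') ++ ['}']) ++ Z) := by
      match ds' with
      | [] =>
        rw [goB.eq_def]
        simp [digit_not_upper (hdig d (by simp))]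
      | e :: ds'' =>
        rw [goB.eq_def]
        simp [digit_not_upper (hdig d (by simp))]
    have h2 := goB_noBrace_append (p_vars := p_vars) hne Z
    simp only [List.cons_append, List.append_assoc, List.singleton_append] at h1 h2 ⊢
    rw [h1, h2]

-- ---- the pattern block "{X}" ++ t ----
lemma tokAt0_pat {X : Char} (hX : pvUpper X = true) (t : List Char) :
    tokAt0 ('{' :: X :: '}' :: t) = true := by simp [tokAt0, hX]

lemma tokCount_pat {X : Char} (hX : pvUpper X = true) (t : List Char) :
    tokCount ('{' :: X :: '}' :: t) = 1 + tokCount t := by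
  rw [tokCount, tokAt0_pat hX, tokCount, tokAt0_cons_ne (upper_ne_lbrace hX) _,
    tokCount, tokAt0_cons_ne (by decide) _]
  simp

lemma goodToks_pat {p_vars : List String} {X : Char} (hX : pvUpper X = true) {t : List Char}
    (h : goodToks p_vars ('{' :: X :: '}' :: t) = true) :
    (String.ofList [X]) ∈ p_vars ∧ goodToks p_vars t = true := by
  have h0 := goodToks_cons h
  have h1 := goodToks_tail (goodToks_tail (goodToks_tail h))
  refine ⟨?_, h1⟩
  simpa [okAt, hX] using h0

lemma goB_pat {p_vars : List String} {X : Char} (hX : pvUpper X = true) {k : Nat}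
    (hk : PySem.List.index? p_vars (String.ofList [X]) = some k) (t : List Char) :
    goB p_vars ('{' :: X :: '}' :: t) =
      ('{' :: PySem.Int.toChars (k : Int) ++ ['}']) ++ goB p_vars t := by
  rw [goB, hX]
  simp only [PySem.List.index?_eq_idxOf?] at hk
  simp [hk]

-- ---- tokAt0 / okAt are unchanged under repl of the tail ----
lemma lbrace_not_upper : pvUpper '{' = false := by decide

lemma repl_head {X d : Char} {ds' : List Char} {w : List Char}
    (hp : (pat X).isPrefixOf w) :
    ∃ z, repl X ('{' :: (d :: ds') ++ ['}']) w = '{' :: d :: z ∧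
      w = '{' :: X :: '}' :: (w.drop 3) := by
  obtain ⟨t, rfl⟩ := pat_prefix_iff.mp hp
  rw [repl_pos hp]
  exact ⟨ds' ++ '}' :: repl X ('{' :: (d :: ds') ++ ['}']) t, by simp, by simp⟩

lemma tok_repl_eq {X : Char} {ds : List Char} (hds : ds ≠ []) (c : Char) (w : List Char) :
    tokAt0 (c :: repl X ('{' :: ds ++ ['}']) w) = tokAt0 (c :: w) := by
  obtain ⟨d, ds', rfl⟩ := List.exists_cons_of_ne_nil hds
  match w with
  | [] => rw [repl]
  | c1 :: w' =>
    by_cases hp : (pat X).isPrefixOf (c1 :: w')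
    · obtain ⟨z, hz, hw⟩ := repl_head (d := d) (ds' := ds') hp
      rw [hz]
      rw [show c1 :: w' = '{' :: X :: '}' :: ((c1 :: w').drop 3) from hw]
      simp [tokAt0, lbrace_not_upper]
    · rw [repl_neg hp]
      match w' with
      | [] => rw [repl]
      | c2 :: w'' =>
        by_cases hp2 : (pat X).isPrefixOf (c2 :: w'')
        · obtain ⟨z, hz, hw2⟩ := repl_head (d := d) (ds' := ds') hp2
          rw [hz]
          rw [show c2 :: w'' = '{' :: X :: '}' :: ((c2 :: w'').drop 3) from hw2]
          simp [tokAt0]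
        · rw [repl_neg hp2]
          match w'' with
          | [] => rw [repl]
          | c3 :: w''' =>
            by_cases hp3 : (pat X).isPrefixOf (c3 :: w''')
            · obtain ⟨z, hz, hw3⟩ := repl_head (d := d) (ds' := ds') hp3
              rw [hz]
              rw [show c3 :: w''' = '{' :: X :: '}' :: ((c3 :: w''').drop 3) from hw3]
              simp [tokAt0]
            · rw [repl_neg hp3]
              simp [tokAt0]

lemma okAt_repl_eq {p_vars : List String} {X : Char} {ds : List Char} (hds : ds ≠ [])
    (c : Char) (w : List Char) :
    okAt p_vars (c :: repl X ('{' :: ds ++ ['}']) w) = okAt p_vars (c :: w) := by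
  obtain ⟨d, ds', rfl⟩ := List.exists_cons_of_ne_nil hds
  match w with
  | [] => rw [repl]
  | c1 :: w' =>
    by_cases hp : (pat X).isPrefixOf (c1 :: w')
    · obtain ⟨z, hz, hw⟩ := repl_head (d := d) (ds' := ds') hp
      rw [hz]
      rw [show c1 :: w' = '{' :: X :: '}' :: ((c1 :: w').drop 3) from hw]
      simp [okAt, lbrace_not_upper]
    · rw [repl_neg hp]
      match w' with
      | [] => rw [repl]
      | c2 :: w'' =>
        by_cases hp2 : (pat X).isPrefixOf (c2 :: w'')
        · obtain ⟨z, hz, hw2⟩ := repl_head (d := d) (ds' := ds') hp2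
          rw [hz]
          rw [show c2 :: w'' = '{' :: X :: '}' :: ((c2 :: w'').drop 3) from hw2]
          simp [okAt]
        · rw [repl_neg hp2]
          match w'' with
          | [] => rw [repl]
          | c3 :: w''' =>
            by_cases hp3 : (pat X).isPrefixOf (c3 :: w''')
            · obtain ⟨z, hz, hw3⟩ := repl_head (d := d) (ds' := ds') hp3
              rw [hz]
              rw [show c3 :: w''' = '{' :: X :: '}' :: ((c3 :: w''').drop 3) from hw3]
              simp [okAt]
            · rw [repl_neg hp3]
              simp [okAt]
lemma toDigitsCore_digits : ∀ (f n : Nat) (acc : List Char), (∀ c ∈ acc, c.isDigit = true) →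
    ∀ c ∈ Nat.toDigitsCore 10 f n acc, c.isDigit = true := by
  intro f
  induction f with
  | zero => intro n acc h; rw [Nat.toDigitsCore]; exact h
  | succ f ih =>
    intro n acc h
    have hd : (n % 10).digitChar.isDigit = true := by
      have : n % 10 < 10 := Nat.mod_lt _ (by norm_num)
      interval_cases h : n % 10 <;> decide
    rw [Nat.toDigitsCore]
    split
    · intro c hc
      rcases List.mem_cons.mp hc with rfl | hc
      · exact hd
      · exact h c hc
    · exact ih _ _ (by
        intro c hc
        rcases List.mem_cons.mp hc with rfl | hc
        · exact hd
        · exact h c hc)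

lemma toDigitsCore_suffix : ∀ (f n : Nat) (acc : List Char),
    ∃ p, Nat.toDigitsCore 10 f n acc = p ++ acc := by
  intro f
  induction f with
  | zero => intro n acc; exact ⟨[], by rw [Nat.toDigitsCore]; simp⟩
  | succ f ih =>
    intro n acc
    rw [Nat.toDigitsCore]
    split
    · exact ⟨[(n % 10).digitChar], rfl⟩
    · obtain ⟨p, hp⟩ := ih (n / 10) ((n % 10).digitChar :: acc)
      exact ⟨p ++ [(n % 10).digitChar], by simp [hp]⟩

lemma toDigits_ne_nil (n : Nat) : Nat.toDigits 10 n ≠ [] := by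
  rw [Nat.toDigits, Nat.toDigitsCore]
  split
  · simp
  · obtain ⟨p, hp⟩ := toDigitsCore_suffix n (n / 10) [(n % 10).digitChar]
    simp [hp]

lemma toDigits_digits (n : Nat) : ∀ c ∈ Nat.toDigits 10 n, c.isDigit = true :=
  toDigitsCore_digits _ _ _ (by simp)

lemma toDigits_len (n : Nat) : (Nat.toDigits 10 n).length ≤ n + 1 :=
  Nat.toDigits_length 10 n (n + 1) (by omega)
    (lt_of_lt_of_le (Nat.lt_pow_self (by norm_num)) (Nat.pow_le_pow_right (by norm_num) (by omega)))

lemma toChars_nat (k : Nat) : PySem.Int.toChars (k : Int) = Nat.toDigits 10 k := by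
  simp [PySem.Int.toChars]

-- strong induction on list length
lemma length_strong_ind {P : List Char → Prop}
    (H : ∀ l, (∀ m : List Char, m.length < l.length → P m) → P l) : ∀ l, P l := by
  have key : ∀ (n : Nat) (l : List Char), l.length ≤ n → P l := by
    intro n
    induction n with
    | zero => intro l h; exact H l (by intro m hm; omega)
    | succ n ih => intro l h; exact H l (fun m hm => ih m (by omega))
  exact fun l => key l.length l le_rfl

-- ---- length / token count / goodToks / goB through repl ----
lemma len_repl {X : Char} (r : List Char) :
    ∀ t : List Char, (repl X r t).length + 3 * occX X t = t.length + r.length * occX X t := by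
  apply length_strong_ind
  intro t ih
  match t with
  | [] => rw [repl, occX]; simp
  | c :: tt =>
    by_cases hp : (pat X).isPrefixOf (c :: tt)
    · obtain ⟨z, hz⟩ := pat_prefix_iff.mp hp
      rw [repl_pos hp, occX_pos hp]
      have hz2 : List.drop 2 tt = z := by
        have := congrArg (List.drop 3) hz
        simpa using this
      have ihz : (repl X r (List.drop 2 tt)).length + 3 * occX X (List.drop 2 tt) =
          (List.drop 2 tt).length + r.length * occX X (List.drop 2 tt) := by
        apply ih
        cases hz; simp; omega
      have hlen : (c :: tt).length = 3 + z.length := by rw [hz]; simp; omega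
      rw [hz2] at ihz ⊢
      rw [Nat.mul_add, Nat.mul_add, Nat.mul_one, Nat.mul_one]
      simp only [List.length_append, hlen]
      omega
    · rw [repl_neg hp, occX_neg hp]
      have := ih tt (by simp)
      simp only [List.length_cons]
      omega

lemma tokCount_repl {p_vars : List String} {X : Char} (hX : pvUpper X = true) {ds : List Char}
    (hds : ds ≠ []) (hdig : ∀ c ∈ ds, c.isDigit) :
    ∀ t : List Char, tokCount (repl X ('{' :: ds ++ ['}']) t) + occX X t ≤ tokCount t := by
  apply length_strong_ind
  intro t ih
  match t with
  | [] => rw [repl, occX]; simp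
  | c :: tt =>
    by_cases hp : (pat X).isPrefixOf (c :: tt)
    · obtain ⟨z, hz⟩ := pat_prefix_iff.mp hp
      rw [repl_pos hp, occX_pos hp]
      have hz2 : List.drop 2 tt = z := by
        have := congrArg (List.drop 3) hz
        simpa using this
      rw [tokCount_r_append hds hdig, hz2]
      have ihz := ih z (by cases hz; simp; omega)
      have hcount : tokCount (c :: tt) = 1 + tokCount z := by
        rw [hz]; exact tokCount_pat hX z
      omega
    · rw [repl_neg hp, occX_neg hp]
      rw [tokCount, tok_repl_eq hds, tokCount]
      have := ih tt (by simp)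
      omega

lemma goodToks_repl {p_vars : List String} {X : Char} (hX : pvUpper X = true) {ds : List Char}
    (hds : ds ≠ []) (hdig : ∀ c ∈ ds, c.isDigit) :
    ∀ t : List Char, goodToks p_vars t = true →
      goodToks p_vars (repl X ('{' :: ds ++ ['}']) t) = true := by
  apply length_strong_ind
  intro t ih hg
  match t with
  | [] => rw [repl]; rfl
  | c :: tt =>
    by_cases hp : (pat X).isPrefixOf (c :: tt)
    · obtain ⟨z, hz⟩ := pat_prefix_iff.mp hp
      rw [repl_pos hp]
      have hz2 : List.drop 2 tt = z := by
        have := congrArg (List.drop 3) hz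
        simpa using this
      rw [goodToks_r_append hds hdig, hz2]
      refine ih z (by cases hz; simp; omega) ?_
      rw [hz] at hg
      exact (goodToks_pat hX hg).2
    · rw [repl_neg hp]
      rw [goodToks, Bool.and_eq_true]
      refine ⟨?_, ih tt (by simp) (goodToks_tail hg)⟩
      rw [okAt_repl_eq hds]
      exact goodToks_cons hg

-- goB skips a position where no token starts
lemma goB_nonTok {p_vars : List String} {c : Char} {w : List Char}
    (h : tokAt0 (c :: w) = false) : goB p_vars (c :: w) = c :: goB p_vars w := by
  match w with
  | [] => rfl
  | [_] => rfl
  | a :: b :: r =>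
    simp only [tokAt0] at h
    rw [goB]
    simp [h]

lemma goB_short {p_vars : List String} {b : List Char} (h : b.length ≤ 2) :
    goB p_vars b = b := by
  match b with
  | [] => rfl
  | [_] => rfl
  | [_, _] => rfl
  | _ :: _ :: _ :: _ => simp at h

-- goB is unchanged by replacing "{X}" with what goB itself produces for it
lemma goB_repl {p_vars : List String} {X : Char} (hX : pvUpper X = true) {k : Nat}
    (hk : PySem.List.index? p_vars (String.ofList [X]) = some k) {ds : List Char}
    (hds : PySem.Int.toChars (k : Int) = ds) (hne : ds ≠ []) (hdig : ∀ c ∈ ds, c.isDigit) :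
    ∀ t : List Char, goodToks p_vars t = true →
      goB p_vars (repl X ('{' :: ds ++ ['}']) t) = goB p_vars t := by
  apply length_strong_ind
  intro t ih hg
  match t with
  | [] => rw [repl]
  | c :: tt =>
    by_cases hp : (pat X).isPrefixOf (c :: tt)
    · obtain ⟨z, hz⟩ := pat_prefix_iff.mp hp
      rw [repl_pos hp]
      have hz2 : List.drop 2 tt = z := by
        have := congrArg (List.drop 3) hz
        simpa using this
      rw [hz2, goB_r_append hne hdig]
      rw [hz] at hg ⊢
      rw [goB_pat hX hk z, ih z (by cases hz; simp; omega) (goodToks_pat hX hg).2]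
      simp [hds]
    · rw [repl_neg hp]
      by_cases hT : tokAt0 (c :: tt) = true
      · -- a token with another letter starts here
        match c, tt with
        | c, [] => simp [tokAt0] at hT
        | c, [y] => simp [tokAt0] at hT
        | c, y :: z :: tt' =>
          simp only [tokAt0, Bool.and_eq_true, decide_eq_true_eq] at hT
          obtain ⟨⟨rfl, hy⟩, rfl⟩ := hT
          have h1 : repl X ('{' :: ds ++ ['}']) (y :: '}' :: tt') =
              y :: repl X ('{' :: ds ++ ['}']) ('}' :: tt') := by
            apply repl_neg
            intro hpp
            obtain ⟨z, hzz⟩ := pat_prefix_iff.mp hpp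
            have hy' : y = '{' := ((List.cons.injEq _ _ _ _).mp hzz).1
            exact (upper_ne_lbrace hy) hy'
          have h2 : repl X ('{' :: ds ++ ['}']) ('}' :: tt') =
              '}' :: repl X ('{' :: ds ++ ['}']) tt' := by
            apply repl_neg
            intro hpp
            obtain ⟨z, hzz⟩ := pat_prefix_iff.mp hpp
            simp at hzz
          rw [h1, h2]
          obtain ⟨hmem, hgood⟩ := goodToks_pat hy hg
          obtain ⟨ky, hky⟩ := Option.isSome_iff_exists.mp
            ((PySem.List.index?_isSome_iff _ _).mpr hmem)
          rw [goB_pat hy hky, goB_pat hy hky]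
          rw [ih tt' (by simp; omega) hgood]
      · rw [goB_nonTok (by rw [tok_repl_eq hne]; exact Bool.not_eq_true _ ▸ hT)]
        rw [goB_nonTok (Bool.not_eq_true _ ▸ hT)]
        rw [ih tt (by simp) (goodToks_tail hg)]

-- str.replace splits at the first occurrence when no token starts in the prefix
lemma repl_split {X : Char} (r : List Char) (hX : pvUpper X = true) :
    ∀ a t : List Char, (∀ j, j < a.length → tokAt0 ((a ++ '{' :: X :: '}' :: t).drop j) = false) →
      repl X r (a ++ '{' :: X :: '}' :: t) = a ++ r ++ repl X r t := by
  intro a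
  induction a with
  | nil =>
    intro t _
    have hp : (pat X).isPrefixOf ('{' :: X :: '}' :: t) := pat_prefix_iff.mpr ⟨t, rfl⟩
    rw [List.nil_append, repl_pos hp]
    simp
  | cons c a' ih =>
    intro t hj
    have h0 := hj 0 (by simp)
    simp only [List.drop_zero, List.cons_append] at h0
    have hp : ¬ (pat X).isPrefixOf (c :: (a' ++ '{' :: X :: '}' :: t)) := by
      intro hpp
      obtain ⟨z, hzz⟩ := pat_prefix_iff.mp hpp
      rw [hzz] at h0
      rw [tokAt0_pat hX] at h0
      exact absurd h0 (by simp)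
    rw [List.cons_append, repl_neg hp, ih t (by
      intro j hjl
      have := hj (j + 1) (by simp; omega)
      simpa using this)]
    simp

-- ---- extending the scanned prefix ----
lemma getD_append_off (a b : List Char) (m : Nat) (d : Char) :
    (a ++ b).getD (a.length + m) d = b.getD m d := by
  rw [List.getD_append_right _ _ _ _ (by omega)]
  simp

lemma tok_digits_brace {w : List Char} (hw : ∀ c ∈ w, c.isDigit) (R : List Char) :
    tokAt0 (w ++ '}' :: R) = false := by
  match w with
  | [] => exact tokAt0_cons_ne (by decide) R
  | c :: w' => exact tokAt0_cons_ne (digit_ne_lbrace (hw c (by simp))) _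

-- no token starts in the first a.length + 3 positions of a ++ "{digits}" ++ R
lemma noTok_ext {a v R ds : List Char} (hne : ds ≠ []) (hdig : ∀ c ∈ ds, c.isDigit)
    (hj : ∀ j, j < a.length → tokAt0 ((a ++ v).drop j) = false) :
    ∀ j, j < a.length + 3 → tokAt0 ((a ++ ('{' :: ds ++ ['}']) ++ R).drop j) = false := by
  obtain ⟨d, ds', rfl⟩ := List.exists_cons_of_ne_nil hne
  intro j hjlt
  have hS : a ++ ('{' :: (d :: ds') ++ ['}']) ++ R = a ++ ('{' :: ((d :: ds') ++ '}' :: R)) := by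
    simp
  rw [hS]
  by_cases h1 : j + 3 ≤ a.length
  · rw [List.drop_append_of_le_length (by omega)]
    have h3 : 3 ≤ (List.drop j a).length := by simp; omega
    rw [tokAt0_eq_of_three h3 (w := v)]
    rw [← List.drop_append_of_le_length (by omega)]
    exact hj j (by omega)
  · by_cases h2 : j ≤ a.length
    · rw [List.drop_append_of_le_length h2]
      have hlen : (List.drop j a).length ≤ 2 := by simp; omega
      rcases hu : List.drop j a with _ | ⟨x, _ | ⟨y, _ | ⟨zz, uu⟩⟩⟩
      · rw [List.nil_append, List.cons_append]
        exact tokAt0_r (hdig d (by simp)) _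
      · exact tokAt0_nonupper lbrace_not_upper _
      · simp [tokAt0]
      · rw [hu] at hlen; simp at hlen
    · have hm : j = a.length + (j - a.length) := by omega
      rw [hm, List.drop_append]
      have hnil : List.drop (a.length + (j - a.length)) a = [] := by
        apply List.drop_eq_nil_of_le; omega
      rw [hnil, List.nil_append]
      have : j - a.length = 1 ∨ j - a.length = 2 := by omega
      have hsub : a.length + (j - a.length) - a.length = j - a.length := by omega
      rw [hsub]
      rcases this with h | h <;> rw [h]
      · have hdr : List.drop 1 ('{' :: (d :: ds' ++ '}' :: R)) = d :: (ds' ++ '}' :: R) := rfl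
        rw [hdr]
        exact tokAt0_cons_ne (digit_ne_lbrace (hdig d (by simp))) _
      · have hdr : List.drop 2 ('{' :: (d :: ds' ++ '}' :: R)) = ds' ++ '}' :: R := rfl
        rw [hdr]
        exact tok_digits_brace (fun c hc => hdig c (by simp [hc])) R

lemma tokCount_le_len : ∀ b : List Char, tokCount b ≤ b.length := by
  intro b
  induction b with
  | nil => simp [tokCount]
  | cons c r ih => rw [tokCount]; simp; split <;> omega

-- ---- the master loop lemma ----
lemma loopA_main {p_vars : List String} :
    ∀ (fuel : Nat) (a b : List Char),
      (∀ j, j < a.length → tokAt0 ((a ++ b).drop j) = false) →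
      goodToks p_vars b = true →
      b.length + (p_vars.length + 2) * tokCount b ≤ fuel →
      loopA p_vars fuel (a ++ b) a.length = a ++ goB p_vars b := by
  intro fuel
  induction fuel with
  | zero =>
    intro a b hj hg hf
    have hb : b = [] := List.eq_nil_of_length_eq_zero (by omega)
    subst hb
    rw [loopA, goB]
  | succ n ih =>
    intro a b hj hg hf
    rw [loopA]
    by_cases hcond : a.length + 2 < (a ++ b).length
    · have hblen : 2 < b.length := by simp at hcond; omega
      rw [if_pos hcond]
      match b, hblen, hj, hg, hf with
      | x :: y :: z :: t, hblen, hj, hg, hf =>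
      have g0 : (a ++ x :: y :: z :: t).getD a.length ' ' = x := by
        simpa using getD_append_off a (x :: y :: z :: t) 0 ' '
      have g1 : (a ++ x :: y :: z :: t).getD (a.length + 1) ' ' = y := by
        simpa using getD_append_off a (x :: y :: z :: t) 1 ' '
      have g2 : (a ++ x :: y :: z :: t).getD (a.length + 2) ' ' = z := by
        simpa using getD_append_off a (x :: y :: z :: t) 2 ' '
      rw [g0, g1, g2]
      have hcond2 : (decide (x = '{') && pvUpper y && decide (z = '}')) =
          tokAt0 (x :: y :: z :: t) := rfl
      rw [hcond2]
      by_cases htok : tokAt0 (x :: y :: z :: t) = true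
      · rw [if_pos htok]
        -- a token "{y}" starts at the scan position
        have hshape : x = '{' ∧ pvUpper y = true ∧ z = '}' := by
          simpa [tokAt0, Bool.and_eq_true, decide_eq_true_eq, and_assoc] using htok
        obtain ⟨rfl, hy, rfl⟩ := hshape
        obtain ⟨hmem, hgt⟩ := goodToks_pat hy hg
        obtain ⟨k, hk⟩ := Option.isSome_iff_exists.mp
          ((PySem.List.index?_isSome_iff _ _).mpr hmem)
        rw [hk]
        dsimp only
        have hklt : k < p_vars.length := by
          obtain ⟨hlt, -, -⟩ := PySem.List.getElem_of_index?_eq_some hk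
          exact hlt
        -- the replaced pattern is s[i:i+3] = "{y}"
        have hslice : (List.drop a.length (a ++ '{' :: y :: '}' :: t)).take 3 = pat y := by
          rw [List.drop_left]; rfl
        rw [hslice]
        -- digits facts for the replacement "{k}"
        set ds := PySem.Int.toChars (k : Int) with hds
        have hds' : ds = Nat.toDigits 10 k := by rw [hds, toChars_nat]
        have hne : ds ≠ [] := by rw [hds']; exact toDigits_ne_nil k
        have hdig : ∀ c ∈ ds, c.isDigit = true := by rw [hds']; exact toDigits_digits k
        have hdlen : ds.length ≤ p_vars.length := by
          rw [hds']
          exact le_trans (toDigits_len k) (by omega)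
        have hr : '{' :: PySem.Int.toChars (k : Int) ++ ['}'] = '{' :: ds ++ ['}'] := by
          rw [hds]
        rw [hr, replace_eq_repl, repl_split _ hy a t hj]
        -- facts about the replaced tail
        have hlenr := len_repl ('{' :: ds ++ ['}']) t (X := y)
        have htc := tokCount_repl (p_vars := p_vars) hy hne hdig t
        have hgr := goodToks_repl (p_vars := p_vars) hy hne hdig t hgt
        have hgBr := goB_repl hy hk hds.symm hne hdig t hgt
        -- fuel bookkeeping
        have hfuel0 : (3 + t.length) + (p_vars.length + 2) * (1 + tokCount t) ≤ n + 1 := by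
          have h1 : tokCount ('{' :: y :: '}' :: t) = 1 + tokCount t := tokCount_pat hy t
          rw [h1] at hf
          simp only [List.length_cons] at hf
          omega
        have hfuel : (ds.length - 1 + (repl y ('{' :: ds ++ ['}']) t).length) +
            (p_vars.length + 2) * tokCount (repl y ('{' :: ds ++ ['}']) t) + 1 ≤ n := by
          have hD1 : 1 ≤ ds.length := by
            rcases ds with _ | ⟨u, us⟩
            · exact absurd rfl hne
            · simp
          have hRlen : (repl y ('{' :: ds ++ ['}']) t).length + 3 * occX y t =
              t.length + (ds.length + 2) * occX y t := by
            simpa using hlenr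
          have p2 : (p_vars.length + 2) * tokCount (repl y ('{' :: ds ++ ['}']) t) +
              (p_vars.length + 2) * occX y t ≤ (p_vars.length + 2) * tokCount t := by
            rw [← Nat.mul_add]
            exact Nat.mul_le_mul_left _ htc
          have p1 : (ds.length + 2) * occX y t ≤ (p_vars.length + 2) * occX y t :=
            Nat.mul_le_mul_right _ (by omega)
          have e4 : (p_vars.length + 2) * (1 + tokCount t) =
              (p_vars.length + 2) + (p_vars.length + 2) * tokCount t := by ring
          rw [e4] at hfuel0
          generalize (p_vars.length + 2) * tokCount (repl y ('{' :: ds ++ ['}']) t) = A1 at *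
          generalize (p_vars.length + 2) * occX y t = A2 at *
          generalize (p_vars.length + 2) * tokCount t = A3 at *
          generalize (ds.length + 2) * occX y t = A4 at *
          omega
        -- apply the induction hypothesis, splitting on the length of ds
        clear hds' hr hlenr htc
        clear_value ds
        obtain ⟨d, ds2, rfl⟩ := List.exists_cons_of_ne_nil hne
        match ds2, hds, hne, hdig, hdlen, hgr, hgBr, hfuel with
        | [], hds, hne, hdig, hdlen, hgr, hgBr, hfuel =>
          -- ds = [d] : new prefix a ++ "{d}"
          have key := ih (a ++ ['{', d, '}']) (repl y ('{' :: [d] ++ ['}']) t)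
            (by
              have hnt := noTok_ext (a := a) (v := '{' :: y :: '}' :: t)
                (R := repl y ('{' :: [d] ++ ['}']) t) (ds := [d]) (by simp)
                (by intro c2 hc; simp at hc; rw [hc]; exact hdig d (by simp)) hj
              intro j hjl
              have h2 := hnt j (by simpa using hjl)
              simp only [List.cons_append, List.append_assoc, List.nil_append,
                List.singleton_append] at h2 ⊢
              simpa using h2)
            hgr
            (by
              refine le_trans ?_ hfuel
              simp)
          have ha3 : (a ++ ['{', d, '}']).length = a.length + 3 := by simp
          rw [← ha3]
          have hassoc : a ++ ('{' :: [d] ++ ['}']) ++ repl y ('{' :: [d] ++ ['}']) t =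
              (a ++ ['{', d, '}']) ++ repl y ('{' :: [d] ++ ['}']) t := by simp
          rw [hassoc, key, hgBr, goB_pat hy hk]
          simp [← hds]
        | e :: es, hds, hne, hdig, hdlen, hgr, hgBr, hfuel =>
          -- ds = d :: e :: es : new prefix a ++ "{de", rest "es}" ++ replaced tail
          have hes : ∀ c ∈ es ++ ['}'], c ≠ '{' := by
            intro c hc
            rcases List.mem_append.mp hc with h | h
            · exact digit_ne_lbrace (hdig c (by simp [h]))
            · simp at h; subst h; decide
          have key := ih (a ++ ['{', d, e]) (es ++ '}' :: repl y ('{' :: (d :: e :: es) ++ ['}']) t)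
            (by
              have hnt := noTok_ext (a := a) (v := '{' :: y :: '}' :: t)
                (R := repl y ('{' :: (d :: e :: es) ++ ['}']) t) (ds := d :: e :: es) (by simp)
                hdig hj
              intro j hjl
              have h2 := hnt j (by simpa using hjl)
              simp only [List.cons_append, List.append_assoc, List.singleton_append,
                List.nil_append] at h2 ⊢
              simpa using h2)
            (by
              have hgn := goodToks_noBrace_append (p_vars := p_vars) hes
                (repl y ('{' :: (d :: e :: es) ++ ['}']) t)
              simp only [List.append_assoc, List.singleton_append] at hgn
              rw [hgn]
              exact hgr)
            (by
              have htn := tokCount_noBrace_append hes (repl y ('{' :: (d :: e :: es) ++ ['}']) t)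
              simp only [List.append_assoc, List.singleton_append] at htn
              rw [htn]
              refine le_trans ?_ hfuel
              simp
              omega)
          have ha3 : (a ++ ['{', d, e]).length = a.length + 3 := by simp
          rw [← ha3]
          have hassoc : a ++ ('{' :: (d :: e :: es) ++ ['}']) ++
              repl y ('{' :: (d :: e :: es) ++ ['}']) t =
              (a ++ ['{', d, e]) ++ (es ++ '}' :: repl y ('{' :: (d :: e :: es) ++ ['}']) t) := by
            simp
          rw [hassoc, key]
          have hgB2 := goB_noBrace_append (p_vars := p_vars) hes
            (repl y ('{' :: (d :: e :: es) ++ ['}']) t)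
          simp only [List.append_assoc, List.singleton_append] at hgB2
          rw [hgB2, hgBr, goB_pat hy hk]
          simp [← hds]
      · rw [if_neg htok]
        have key := ih (a ++ [x]) (y :: z :: t)
          (by
            intro j hjl
            simp only [List.append_assoc, List.cons_append, List.nil_append]
            by_cases hja : j < a.length
            · have := hj j hja
              simpa using this
            · have hja2 : j = a.length := by simp at hjl; omega
              subst hja2
              have : (a ++ x :: y :: z :: t).drop a.length = x :: y :: z :: t :=
                List.drop_left
              rw [show a ++ x :: y :: z :: t = a ++ x :: y :: z :: t from rfl] at this
              simpa [this] using (Bool.not_eq_true _ ▸ htok)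
          )
          (goodToks_tail hg)
          (by
            rw [tokCount] at hf
            have hmono : (p_vars.length + 2) * tokCount (y :: z :: t) ≤
                (p_vars.length + 2) * ((if tokAt0 (x :: y :: z :: t) then 1 else 0) +
                  tokCount (y :: z :: t)) := Nat.mul_le_mul_left _ (by omega)
            generalize (p_vars.length + 2) * tokCount (y :: z :: t) = A1 at *
            generalize (p_vars.length + 2) * ((if tokAt0 (x :: y :: z :: t) then 1 else 0) +
              tokCount (y :: z :: t)) = A2 at *
            simp only [List.length_cons] at hf ⊢
            omega)
        have ha1 : (a ++ [x]).length = a.length + 1 := by simp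
        rw [← ha1]
        have hassoc : a ++ x :: y :: z :: t = (a ++ [x]) ++ (y :: z :: t) := by simp
        rw [hassoc, key, goB_nonTok (c := x) (w := y :: z :: t) (Bool.not_eq_true _ ▸ htok)]
        simp
    · rw [if_neg hcond]
      have hble : b.length ≤ 2 := by simp at hcond; omega
      rw [goB_short hble]

-- ===== VERDICT (by name: the statement is the Claim_ definition above) =====
theorem inverse_parse_gdl_spec : Claim_equal_inverse_parse_gdl := by
  unfold Claim_equal_inverse_parse_gdl
  intro p_vars s _ hpre
  unfold Pre_inverse_parse_gdl at hpre
  unfold Spec_inverse_parse_gdl inverse_parse_gdl inverse_parse_gdl_alt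
  congr 1
  have hT := tokCount_le_len s.toList
  have hfuel : s.toList.length + (p_vars.length + 2) * tokCount s.toList ≤
      s.toList.length * (p_vars.length + 3) := by
    have h1 : (p_vars.length + 2) * tokCount s.toList ≤ (p_vars.length + 2) * s.toList.length :=
      Nat.mul_le_mul_left _ hT
    have h2 : s.toList.length * (p_vars.length + 3) =
        s.toList.length + (p_vars.length + 2) * s.toList.length := by ring
    generalize (p_vars.length + 2) * tokCount s.toList = A1 at *
    generalize (p_vars.length + 2) * s.toList.length = A2 at *
    omega
  have hmain := loopA_main (p_vars := p_vars) (s.toList.length * (p_vars.length + 3)) [] s.toList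
    (by intro j hj; simp at hj) hpre (by simpa using hfuel)
  simpa using hmain
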